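-- pv_equiv track=rewrite | github.com/nad-garraz/codewars_practice | python/barista/barista.py | barista
-- ===== SOURCE A (Python) =====
-- def barista(coffees):
--     if len(coffees) < 1:
--         return 0
--     else:
--         for i in range(len(coffees)):
--             for j in range(len(coffees)):
--                 if coffees[j] > coffees[i]:
--                     temp = coffees[i]
--                     coffees[i] = coffees[j]
--                     coffees[j] = temp
--                 else:
--                     continue
--         espera = 0;
--         final =0;
--         for i in range(len(coffees)):
--             if i == 0 or i == len(coffees):
--                 espera += coffees[i]
--             else:
--                 espera += coffees[i] + 2
--             final += espera
--     return final
-- ===== SOURCE B (Python) =====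
-- def barista(coffees):
--     coffees.sort()
--     n = len(coffees)
--     return n * (n - 1) + sum(c * (n - j) for j, c in enumerate(coffees))
-- ===== Notes on version B (the rewrite author's own statement) =====
-- stated objective: faster
-- what changed: Replaces the quadratic exchange-sort plus running prefix-accumulator pass with the library sort (in place, preserving A's mutation) and a single closed-form weighted sum n*(n-1) + sum(c*(n-j)).
import Mathlib
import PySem

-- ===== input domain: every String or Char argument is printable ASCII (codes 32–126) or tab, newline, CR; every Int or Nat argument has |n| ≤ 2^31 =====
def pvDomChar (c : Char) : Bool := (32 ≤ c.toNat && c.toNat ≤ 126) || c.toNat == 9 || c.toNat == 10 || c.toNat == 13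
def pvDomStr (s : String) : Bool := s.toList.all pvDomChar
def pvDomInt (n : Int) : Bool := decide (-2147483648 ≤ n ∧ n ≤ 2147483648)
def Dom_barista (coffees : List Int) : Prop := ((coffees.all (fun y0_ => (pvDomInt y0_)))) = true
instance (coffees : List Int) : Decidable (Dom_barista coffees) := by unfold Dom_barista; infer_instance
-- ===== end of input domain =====

-- B sorts with the library sort and returns the closed-form weighted sum n*(n-1) + Σ c_j*(n-j)
-- instead of A's exchange sort plus running prefix-accumulator pass; in Python both mutate the
-- argument into the same ascending order (the equivalence proved here is about the return value).

-- ===== PORT A =====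
-- the swap body of A's inner loop: temp = coffees[i]; coffees[i] = coffees[j]; coffees[j] = temp
def swapStep (s : List Int) (i j : Int) : List Int :=
  if PySem.List.pyGetD s j 0 > PySem.List.pyGetD s i 0 then
    let temp := PySem.List.pyGetD s i 0
    let s1 := PySem.List.pySetD s i (PySem.List.pyGetD s j 0)
    PySem.List.pySetD s1 j temp
  else s

def innerPass (n i : Int) (s : List Int) : List Int :=
  (PySem.List.pyRange 0 n 1).foldl (fun s j => swapStep s i j) s

def sortLoop (n : Int) (s : List Int) : List Int :=
  (PySem.List.pyRange 0 n 1).foldl (fun s i => innerPass n i s) s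

def payLoop (n : Int) (s : List Int) : Int × Int :=
  (PySem.List.pyRange 0 n 1).foldl (fun (p : Int × Int) i =>
    let espera := if i = 0 ∨ i = n then p.1 + PySem.List.pyGetD s i 0
                  else p.1 + PySem.List.pyGetD s i 0 + 2
    (espera, p.2 + espera)) (0, 0)

def barista (coffees : List Int) : Int :=
  if coffees.length < 1 then 0
  else
    let n : Int := (coffees.length : Int)
    let s := sortLoop n coffees
    (payLoop n s).2

-- ===== PORT B =====
def barista_alt (coffees : List Int) : Int :=
  let s := PySem.List.sorted coffees (fun x => x) false
  let n : Int := (s.length : Int)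
  n * (n - 1) + (PySem.List.enumerate s 0).foldl (fun acc p => acc + p.2 * (n - p.1)) 0

-- ===== PRECONDITION & SPEC =====
def Spec_barista (coffees : List Int) (out : Int) : Prop := out = barista_alt coffees
instance (coffees : List Int) (out : Int) : Decidable (Spec_barista coffees out) := by unfold Spec_barista; infer_instance

-- ===== CLAIM (what is proved, stated in full; the proofs are below) =====
def Claim_equal_barista : Prop := ∀ (coffees : List Int), Dom_barista coffees → Spec_barista coffees (barista coffees)

-- ===== LEMMAS AND PROOFS =====

theorem pyGetD_append_cons (A : List Int) (w : Int) (B : List Int) :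
    PySem.List.pyGetD (A ++ w :: B) ((A.length : Int)) 0 = w := by
  rw [PySem.List.pyGetD_natCast]
  simp [List.getD_eq_getElem?_getD]

theorem pySetD_append_cons (A : List Int) (w v : Int) (B : List Int) :
    PySem.List.pySetD (A ++ w :: B) ((A.length : Int)) v = A ++ v :: B := by
  rw [PySem.List.pySetD_natCast]
  simp

theorem swapStep_at (q : List Int) (a : Int) (B : List Int) (w : Int) (t : List Int) :
    swapStep (q ++ (a :: B ++ w :: t)) (((q.length + 1 + B.length : Nat) : Int)) ((q.length : Int))
      = if w < a then q ++ (w :: B ++ a :: t) else q ++ (a :: B ++ w :: t) := by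
  have hsh : q ++ (a :: B ++ w :: t) = (q ++ a :: B) ++ w :: t := by simp
  have hlen : ((q.length + 1 + B.length : Nat) : Int) = ((q ++ a :: B).length : Int) := by simp; omega
  have hj : PySem.List.pyGetD (q ++ (a :: B ++ w :: t)) ((q.length : Int)) 0 = a := by
    have h0 := pyGetD_append_cons q a (B ++ w :: t)
    simpa using h0
  have hi : PySem.List.pyGetD (q ++ (a :: B ++ w :: t)) (((q.length + 1 + B.length : Nat) : Int)) 0 = w := by
    rw [hlen, hsh, pyGetD_append_cons]
  unfold swapStep
  rw [hj, hi]
  by_cases hc : w < a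
  · rw [if_pos hc, if_pos hc]
    rw [hlen]
    conv_lhs => rw [hsh]
    rw [pySetD_append_cons]
    have : (q ++ a :: B) ++ a :: t = q ++ a :: (B ++ a :: t) := by simp
    rw [this, pySetD_append_cons]
    simp
  · rw [if_neg hc, if_neg hc]

theorem orderedInsert_append_singleton (l : List Int) (v x : Int) (h : v ≤ x) :
    List.orderedInsert (· ≤ ·) v (l ++ [x]) = List.orderedInsert (· ≤ ·) v l ++ [x] := by
  induction l with
  | nil => simp [List.orderedInsert, h]
  | cons y l ih =>
      by_cases hv : v ≤ y <;> simp [List.orderedInsert, hv, ih]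

theorem orderedInsert_of_forall_lt (l : List Int) (v : Int) (h : ∀ y ∈ l, ¬ v ≤ y) :
    List.orderedInsert (· ≤ ·) v l = l ++ [v] := by
  induction l with
  | nil => simp
  | cons y l ih =>
      have := h y (by simp)
      simp only [List.orderedInsert, if_neg this]
      rw [ih (fun y hy => h y (by simp [hy]))]; rfl

theorem le_last_of_pairwise (q : List Int) (w x : Int)
    (h : (q ++ [w]).Pairwise (· ≤ ·)) (hx : x ∈ q ++ [w]) : x ≤ w := by
  rcases List.mem_append.1 hx with hq | hw
  · exact (List.pairwise_append.1 h).2.2 x hq w (by simp)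
  · simp at hw; omega

theorem foldl_swapStep_noop (js : List Int) (s : List Int) (i : Int)
    (h : ∀ j ∈ js, PySem.List.pyGetD s j 0 ≤ PySem.List.pyGetD s i 0) :
    js.foldl (fun s j => swapStep s i j) s = s := by
  induction js with
  | nil => rfl
  | cons j js ih =>
      have hj := h j (by simp)
      have hns : swapStep s i j = s := by
        unfold swapStep; rw [if_neg]; omega
      simp only [List.foldl_cons, hns]
      exact ih (fun j hj => h j (by simp [hj]))

theorem decompose_at (l : List Int) (m : Nat) (h : m < l.length) :
    l = l.take m ++ l[m] :: l.drop (m+1) := by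
  conv_lhs => rw [← List.take_append_drop m l, List.drop_eq_getElem_cons h]

theorem inner_prefix (p : List Int) (v : Int) (t : List Int) (hp : p.Pairwise (· ≤ ·)) :
    ∀ m : Nat, m ≤ p.length → ∃ q w,
      List.orderedInsert (· ≤ ·) v (p.take m) = q ++ [w] ∧
      (PySem.List.pyRange 0 (m : Int) 1).foldl
          (fun s j => swapStep s ((p.length : Int)) j) (p ++ v :: t)
        = q ++ (p.drop m ++ w :: t) := by
  intro m
  induction m with
  | zero =>
      intro _
      exact ⟨[], v, by simp, by simp [PySem.List.pyRange_one_eq_nil]⟩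
  | succ m ih =>
      intro hm
      obtain ⟨q, w, hins, hfold⟩ := ih (by omega)
      have hmlt : m < p.length := by omega
      have hq : q.length = m := by
        have h1 := List.orderedInsert_length (α := Int) (· ≤ ·) (p.take m) v
        rw [hins] at h1
        simp [List.length_take, Nat.min_eq_left (le_of_lt hmlt)] at h1
        omega
      have hrange : PySem.List.pyRange 0 ((m+1 : Nat) : Int) 1
          = PySem.List.pyRange 0 (m : Int) 1 ++ [(m : Int)] := by
        push_cast
        exact PySem.List.pyRange_one_succ_right (by positivity)
      have hdrop : p.drop m = p[m] :: p.drop (m+1) := List.drop_eq_getElem_cons hmlt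
      have htake : p.take (m+1) = p.take m ++ [p[m]] := by
        rw [List.take_add_one, List.getElem?_eq_getElem hmlt]; rfl
      have hF : ∀ y ∈ p.take m, y ≤ p[m] := by
        intro y hy
        obtain ⟨k, hk, hky⟩ := List.getElem_of_mem hy
        have hk' : k < m := by simpa [List.length_take, Nat.min_eq_left (le_of_lt hmlt)] using hk
        have := (List.pairwise_iff_getElem.1 hp) k m (by omega) hmlt hk'
        rw [← hky, List.getElem_take]
        exact this
      have hstep : ∀ (w' : Int),
          swapStep (q ++ (p.drop m ++ w' :: t)) ((p.length : Int)) ((m:Int))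
            = if w' < p[m] then q ++ (w' :: p.drop (m+1) ++ p[m] :: t)
              else q ++ (p[m] :: p.drop (m+1) ++ w' :: t) := by
        intro w'
        have hcast : ((p.length : Int)) = ((m + 1 + (p.drop (m+1)).length : Nat) : Int) := by
          simp [List.length_drop]; omega
        have h2 := swapStep_at q (p[m]) (p.drop (m+1)) w' t
        rw [hq] at h2
        rw [hdrop, hcast]
        simpa using h2
      rw [hrange, List.foldl_append, hfold]
      simp only [List.foldl_cons, List.foldl_nil]
      by_cases hv : v ≤ p[m]
      · have hins' : List.orderedInsert (· ≤ ·) v (p.take (m+1)) = (q ++ [w]) ++ [p[m]] := by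
          rw [htake, orderedInsert_append_singleton _ _ _ hv, hins]
        by_cases hc : w < p[m]
        · refine ⟨q ++ [w], p[m], hins', ?_⟩
          rw [hstep, if_pos hc]
          simp
        · have hwmem : w ∈ List.orderedInsert (· ≤ ·) v (p.take m) := by rw [hins]; simp
          have hwle : w ≤ p[m] := by
            rcases (List.mem_orderedInsert _).1 hwmem with h | h
            · omega
            · exact hF w h
          have hweq : w = p[m] := by omega
          refine ⟨q ++ [w], p[m], hins', ?_⟩
          rw [hstep, if_neg hc]
          rw [hweq]
          simp
          rw [hdrop]
          simp only [List.cons_append]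
      · have hlt : ∀ y ∈ p.take m, ¬ v ≤ y := by
          intro y hy h; exact hv (le_trans h (hF y hy))
        have hqv : q = p.take m ∧ w = v := by
          have h1 : q ++ [w] = p.take m ++ [v] := by
            rw [← hins, orderedInsert_of_forall_lt _ _ hlt]
          have := List.append_inj' h1 rfl
          exact ⟨this.1, by simpa using this.2⟩
        have hins' : List.orderedInsert (· ≤ ·) v (p.take (m+1)) = p.take (m+1) ++ [v] := by
          apply orderedInsert_of_forall_lt
          intro y hy
          rw [htake] at hy
          rcases List.mem_append.1 hy with h | h
          · exact hlt y h
          · simp at h; omega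
        refine ⟨p.take (m+1), v, hins', ?_⟩
        rw [hstep, if_neg (by omega)]
        rw [hqv.1, hqv.2, htake]
        simp
        rw [hdrop]
        simp only [List.cons_append]
        rw [htake]
        simp only [List.append_assoc, List.singleton_append]

theorem innerPass_eq (p : List Int) (v : Int) (t : List Int)
    (hp : p.Pairwise (· ≤ ·)) (hmax : ∀ x ∈ t, ∃ y ∈ p, x ≤ y) :
    innerPass (((p ++ v :: t).length : Int)) ((p.length : Int)) (p ++ v :: t)
      = List.orderedInsert (· ≤ ·) v p ++ t := by
  obtain ⟨q, w, hins, hfold⟩ := inner_prefix p v t hp p.length le_rfl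
  rw [List.take_length] at hins
  rw [List.drop_length] at hfold
  have hq : q.length = p.length := by
    have h1 := List.orderedInsert_length (α := Int) (· ≤ ·) p v
    rw [hins] at h1; simp at h1; omega
  have hIsort : (q ++ [w]).Pairwise (· ≤ ·) := by
    rw [← hins]; exact List.Pairwise.orderedInsert v p hp
  have hlast : ∀ x ∈ q ++ w :: t, x ≤ w := by
    intro x hx
    rcases List.mem_append.1 hx with h | h
    · exact le_last_of_pairwise q w x hIsort (by simp [h])
    · rcases List.mem_cons.1 h with h | h
      · omega
      · obtain ⟨y, hy, hxy⟩ := hmax x h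
        have : y ≤ w := le_last_of_pairwise q w y hIsort
          (by rw [← hins]; exact (List.mem_orderedInsert _).2 (Or.inr hy))
        omega
  have hN : ((p.length : Int)) ≤ ((p ++ v :: t).length : Int) := by simp; omega
  unfold innerPass
  rw [PySem.List.pyRange_one_append 0 ((p.length : Int)) _ (by positivity) hN,
      List.foldl_append, hfold]
  simp only [List.nil_append]
  have hSlen : (q ++ w :: t).length = (p ++ v :: t).length := by simp [hq]
  rw [foldl_swapStep_noop]
  · rw [hins]; simp
  · intro j hj
    have hjr := (PySem.List.mem_pyRange_one).1 hj
    have hgi : PySem.List.pyGetD (q ++ w :: t) ((p.length : Int)) 0 = w := by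
      rw [← hq]; exact pyGetD_append_cons q w t
    rw [hgi]
    apply hlast
    apply PySem.List.pyGetD_mem
    simp [PySem.Raise.InRange] at *
    constructor <;> [omega; skip]
    have : j < ((p ++ v :: t).length : Int) := by simpa using hjr.2
    simp at this
    omega

theorem pass0_aux (v : Int) (t : List Int) : ∀ m : Nat, m ≤ t.length → ∃ w t',
    (PySem.List.pyRange 0 ((1 + m : Nat) : Int) 1).foldl (fun s j => swapStep s 0 j) (v :: t)
      = w :: t' ∧
    (w :: t').Perm (v :: t) ∧ (∀ x ∈ t'.take m, x ≤ w) ∧ t'.drop m = t.drop m ∧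
    t'.length = t.length := by
  intro m
  induction m with
  | zero =>
      intro _
      refine ⟨v, t, ?_, List.Perm.refl _, by simp, rfl, rfl⟩
      have h1 : ((1 + 0 : Nat) : Int) = 0 + 1 := by omega
      rw [h1, PySem.List.pyRange_one_singleton]
      simp only [List.foldl_cons, List.foldl_nil]
      unfold swapStep
      rw [if_neg (by omega)]
  | succ m ih =>
      intro hm
      have hmlt : m < t.length := by omega
      obtain ⟨w, t', hfold, hperm, hmaxtk, hdropeq, hlen⟩ := ih (by omega)
      have hmlt' : m < t'.length := by omega
      have ht'm : t'[m] = t[m] := by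
        have h0 : (t'.drop m)[0]? = (t.drop m)[0]? := by rw [hdropeq]
        rw [List.getElem?_drop, List.getElem?_drop] at h0
        rw [List.getElem?_eq_getElem (by omega : m + 0 < t'.length),
            List.getElem?_eq_getElem (by omega : m + 0 < t.length)] at h0
        simpa using h0
      have hrange : PySem.List.pyRange 0 ((1 + (m+1) : Nat) : Int) 1
          = PySem.List.pyRange 0 ((1 + m : Nat) : Int) 1 ++ [((1 + m : Nat) : Int)] := by
        have h2 : ((1 + (m+1) : Nat) : Int) = ((1 + m : Nat) : Int) + 1 := by push_cast; ring
        rw [h2]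
        exact PySem.List.pyRange_one_succ_right (by positivity)
      rw [hrange, List.foldl_append, hfold]
      simp only [List.foldl_cons, List.foldl_nil]
      have hA : (t'.take m).length = m := by simp [Nat.min_eq_left (le_of_lt hmlt')]
      have hshape : w :: t' = (w :: t'.take m) ++ t'[m] :: t'.drop (m+1) := by
        conv_lhs => rw [decompose_at t' m hmlt']
        simp only [List.cons_append]
      have hlen2 : ((1 + m : Nat) : Int) = (((w :: t'.take m).length : Nat) : Int) := by
        simp [hA]; omega
      have hgj : PySem.List.pyGetD (w :: t') ((1 + m : Nat) : Int) 0 = t[m] := by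
        rw [hlen2]
        conv_lhs => rw [hshape]
        rw [pyGetD_append_cons, ht'm]
      have hgi : PySem.List.pyGetD (w :: t') (0 : Int) 0 = w := by
        simp [PySem.List.pyGetD_zero_cons]
      have hset3 : t'.set m w = t'.take m ++ w :: t'.drop (m+1) :=
        List.set_eq_take_cons_drop w hmlt'
      have hdropnew : List.drop (m+1) (t'.set m w) = List.drop (m+1) t := by
        rw [hset3, List.drop_append, hA, List.drop_of_length_le (by omega : (t'.take m).length ≤ m + 1)]
        have h4 : m + 1 - m = 1 := by omega
        rw [h4]
        simp only [List.drop_succ_cons, List.drop_zero, List.nil_append]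
        have h5 : t'.drop (m+1) = (t'.drop m).drop 1 := by rw [List.drop_drop]
        rw [h5, hdropeq, List.drop_drop]
      have hdropold : t'.drop (m+1) = t.drop (m+1) := by
        have h5 : t'.drop (m+1) = (t'.drop m).drop 1 := by rw [List.drop_drop]
        rw [h5, hdropeq, List.drop_drop]
      unfold swapStep
      rw [hgj, hgi]
      by_cases hc : w < t[m]
      · rw [if_pos hc]
        have hset1 : PySem.List.pySetD (w :: t') (0:Int) (t[m]) = t[m] :: t' := by
          rw [PySem.List.pySetD_of_nonneg _ _ (by omega)]
          rfl
        rw [hset1]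
        have hset2 : PySem.List.pySetD (t[m] :: t') ((1 + m : Nat) : Int) w
            = t[m] :: t'.set m w := by
          rw [PySem.List.pySetD_of_nonneg _ _ (by positivity)]
          have h3 : ((1 + m : Nat) : Int).toNat = m + 1 := by omega
          rw [h3]
          rfl
        rw [hset2]
        refine ⟨t[m], t'.set m w, rfl, ?_, ?_, hdropnew, by simp [hlen]⟩
        · have p1 : (t'.take m ++ w :: t'.drop (m+1)).Perm
              (w :: (t'.take m ++ t'.drop (m+1))) := List.perm_middle
          have p2 : (t'.take m ++ t[m] :: t'.drop (m+1)).Perm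
              (t[m] :: (t'.take m ++ t'.drop (m+1))) := List.perm_middle
          have pfin : (t[m] :: t'.set m w).Perm (w :: t') := by
            rw [hset3]
            conv_rhs => rw [decompose_at t' m hmlt', ht'm]
            exact ((p1.cons (t[m])).trans
              (List.Perm.swap (t[m]) w _).symm).trans ((p2.symm).cons w)
          exact pfin.trans hperm
        · intro x hx
          have htk : (t'.set m w).take (m+1) = t'.take m ++ [w] := by
            rw [hset3, List.take_append, hA, List.take_of_length_le (by omega : (t'.take m).length ≤ m + 1)]
            have h4 : m + 1 - m = 1 := by omega
            rw [h4]
            rfl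
          rw [htk] at hx
          rcases List.mem_append.1 hx with h | h
          · have := hmaxtk x h; omega
          · simp at h; omega
      · rw [if_neg hc]
        refine ⟨w, t', rfl, hperm, ?_, ?_, hlen⟩
        · intro x hx
          rw [List.take_add_one, List.getElem?_eq_getElem hmlt'] at hx
          rcases List.mem_append.1 hx with h | h
          · exact hmaxtk x h
          · simp [ht'm] at h; omega
        · exact hdropold

theorem pass0 (v : Int) (t : List Int) :
    ∃ w t', innerPass (((v :: t).length : Int)) 0 (v :: t) = w :: t' ∧
      (w :: t').Perm (v :: t) ∧ ∀ x ∈ t', x ≤ w := by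
  obtain ⟨w, t', hfold, hperm, hmax, _, hlen⟩ := pass0_aux v t t.length le_rfl
  refine ⟨w, t', ?_, hperm, ?_⟩
  · unfold innerPass
    have hcast : (((v :: t).length : Nat) : Int) = ((1 + t.length : Nat) : Int) := by
      simp; omega
    rw [hcast, hfold]
  · intro x hx
    have h2 : t'.take t.length = t' := by rw [← hlen]; exact List.take_length
    exact hmax x (by rw [h2]; exact hx)
theorem sortLoop_inv (c : List Int) (hc : c ≠ []) : ∀ k : Nat, k < c.length → ∃ q t,
    (PySem.List.pyRange 0 ((k+1 : Nat) : Int) 1).foldl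
        (fun s i => innerPass ((c.length : Int)) i s) c = q ++ t ∧
    q.length = k+1 ∧ q.Pairwise (· ≤ ·) ∧ (q ++ t).Perm c ∧ (∀ x ∈ t, ∃ y ∈ q, x ≤ y) := by
  intro k
  induction k with
  | zero =>
      intro _
      obtain ⟨v, t, rfl⟩ := List.exists_cons_of_ne_nil hc
      obtain ⟨w, t', hfold, hperm, hmax⟩ := pass0 v t
      refine ⟨[w], t', ?_, rfl, by simp, by simpa using hperm, ?_⟩
      · have h1 : ((0+1 : Nat) : Int) = 0 + 1 := by omega
        rw [h1, PySem.List.pyRange_one_singleton]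
        simpa using hfold
      · intro x hx
        exact ⟨w, by simp, hmax x hx⟩
  | succ k ih =>
      intro hk
      obtain ⟨q, t, hfold, hq, hsort, hperm, hmax⟩ := ih (by omega)
      have hlen : q.length + t.length = c.length := by
        have := hperm.length_eq; simpa using this
      have ht : t ≠ [] := by
        intro h; rw [h] at hlen; simp at hlen; omega
      obtain ⟨v, t₂, rfl⟩ := List.exists_cons_of_ne_nil ht
      have hrange : PySem.List.pyRange 0 ((k+1+1 : Nat) : Int) 1
          = PySem.List.pyRange 0 ((k+1 : Nat) : Int) 1 ++ [((k+1 : Nat) : Int)] := by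
        have h2 : ((k+1+1 : Nat) : Int) = ((k+1 : Nat) : Int) + 1 := by push_cast; ring
        rw [h2]
        exact PySem.List.pyRange_one_succ_right (by positivity)
      rw [hrange, List.foldl_append, hfold]
      simp only [List.foldl_cons, List.foldl_nil]
      have hcn : ((c.length : Nat) : Int) = (((q ++ v :: t₂).length : Nat) : Int) := by
        simp at hlen ⊢; omega
      have hci : ((k+1 : Nat) : Int) = ((q.length : Nat) : Int) := by rw [hq]
      have hpass : innerPass ((c.length : Int)) ((k+1 : Nat) : Int) (q ++ v :: t₂)
          = List.orderedInsert (· ≤ ·) v q ++ t₂ := by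
        rw [hcn, hci]
        exact innerPass_eq q v t₂ hsort
          (fun x hx => hmax x (by simp [hx]))
      rw [hpass]
      refine ⟨List.orderedInsert (· ≤ ·) v q, t₂, rfl, ?_, ?_, ?_, ?_⟩
      · rw [List.orderedInsert_length, hq]
      · exact List.Pairwise.orderedInsert v q hsort
      · have p1 : (List.orderedInsert (· ≤ ·) v q ++ t₂).Perm ((v :: q) ++ t₂) :=
          (List.perm_orderedInsert _ v q).append_right t₂
        have p2 : ((v :: q) ++ t₂).Perm (q ++ v :: t₂) := by
          simpa using (List.perm_middle (a := v) (l₁ := q) (l₂ := t₂)).symm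
        exact (p1.trans p2).trans hperm
      · intro x hx
        obtain ⟨y, hy, hxy⟩ := hmax x (by simp [hx])
        exact ⟨y, (List.mem_orderedInsert _).2 (Or.inr hy), hxy⟩

theorem sortLoop_eq_sorted (c : List Int) :
    sortLoop ((c.length : Int)) c = PySem.List.sorted c (fun x => x) false := by
  by_cases hc : c = []
  · subst hc
    simp [sortLoop, PySem.List.pyRange_one_eq_nil]
    rfl
  · have hlen : c.length = (c.length - 1) + 1 := by
      have := List.length_pos_of_ne_nil hc; omega
    obtain ⟨q, t, hfold, hq, hsort, hperm, _⟩ :=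
      sortLoop_inv c hc (c.length - 1) (by omega)
    have ht : t = [] := by
      have h1 := hperm.length_eq
      simp at h1
      have : t.length = 0 := by omega
    -- placeholder
      exact List.eq_nil_of_length_eq_zero this
    subst ht
    have hcast : (((c.length - 1 : Nat) : Int) + 1) = ((c.length : Nat) : Int) := by omega
    have hfold' : sortLoop ((c.length : Int)) c = q := by
      unfold sortLoop
      rw [← hcast]
      have h3 : ((c.length - 1 + 1 : Nat) : Int) = ((c.length - 1 : Nat) : Int) + 1 := by push_cast; ring
      rw [h3, hcast] at hfold
      rw [hcast]
      simpa using hfold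
    rw [hfold']
    exact (PySem.List.sorted_id_eq_of_perm_of_pairwise c q (by simpa using hperm) hsort).symm

def wsum : List Int → Int → Int
  | [], _ => 0
  | x :: r, cnt => x * cnt + wsum r (cnt - 1)

theorem alt_fold (l : List Int) : ∀ (s a n : Int),
    (PySem.List.enumerate l s).foldl (fun acc p => acc + p.2 * (n - p.1)) a
      = a + wsum l (n - s) := by
  induction l with
  | nil => intro s a n; simp [wsum]
  | cons x r ih =>
      intro s a n
      simp only [PySem.List.enumerate_cons, List.foldl_cons, wsum, ih]
      have h1 : n - (s + 1) = n - s - 1 := by ring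
      rw [h1]; ring

theorem pay_aux (l : List Int) : ∀ (s n e f : Int), 1 ≤ s → s + (l.length : Int) ≤ n →
    (PySem.List.enumerate l s).foldl (fun (p : Int × Int) jc =>
        ((if jc.1 = 0 ∨ jc.1 = n then p.1 + jc.2 else p.1 + jc.2 + 2),
         p.2 + (if jc.1 = 0 ∨ jc.1 = n then p.1 + jc.2 else p.1 + jc.2 + 2))) (e, f)
      = (e + l.sum + 2 * (l.length : Int),
         f + (l.length : Int) * e + wsum l (l.length : Int)
           + (l.length : Int) * ((l.length : Int) + 1)) := by
  induction l with
  | nil => intro s n e f _ _; simp [wsum]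
  | cons x r ih =>
      intro s n e f hs hn
      simp only [List.length_cons] at hn
      have hs0 : ¬ (s = 0 ∨ s = n) := by push_cast at hn; omega
      simp only [PySem.List.enumerate_cons, List.foldl_cons, if_neg hs0]
      rw [ih (s + 1) n (e + x + 2) (f + (e + x + 2)) (by omega) (by push_cast at hn ⊢; omega)]
      simp only [List.sum_cons, List.length_cons, wsum]
      push_cast
      have harg : ((r.length : Int) + 1 - 1) = (r.length : Int) := by ring
      rw [harg, Prod.mk.injEq]
      constructor <;> ring

theorem barista_eq (c : List Int) : barista c = barista_alt c := by
  by_cases hc : c = []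
  · subst hc; rfl
  · have hlp : 0 < c.length := List.length_pos_of_ne_nil hc
    unfold barista
    rw [if_neg (by omega)]
    simp only []
    rw [sortLoop_eq_sorted]
    have hlnept : PySem.List.sorted c (fun x => x) false ≠ [] := by
      rw [Ne, PySem.List.sorted_eq_nil_iff]; exact hc
    obtain ⟨x, r, hxr⟩ := List.exists_cons_of_ne_nil hlnept
    have hlen : (PySem.List.sorted c (fun x => x) false).length = c.length :=
      PySem.List.length_sorted c _ false
    unfold barista_alt
    simp only []
    set l := PySem.List.sorted c (fun x => x) false with hl
    have hlen2 : ((l.length : Nat) : Int) = ((c.length : Nat) : Int) := by rw [hlen]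
    rw [← hlen2]
    -- payLoop as a fold over enumerate
    have hpay : payLoop ((l.length : Int)) l
        = (PySem.List.enumerate l 0).foldl (fun (p : Int × Int) jc =>
            let espera := if jc.1 = 0 ∨ jc.1 = ((l.length : Nat) : Int) then p.1 + jc.2
                          else p.1 + jc.2 + 2
            (espera, p.2 + espera)) (0, 0) := by
      rw [PySem.List.enumerate_eq_map_pyRange l 0, List.foldl_map]
      unfold payLoop
      rfl
    rw [hpay, hxr]
    simp only [PySem.List.enumerate_cons, List.foldl_cons]
    simp only [true_or, if_true]
    have hxl : (((x :: r).length : Nat) : Int) = (r.length : Int) + 1 := by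
      push_cast [List.length_cons]; ring
    have h01 : (0 : Int) + 1 = 1 := by ring
    rw [h01]
    rw [pay_aux r 1 (((x :: r).length : Nat) : Int) (0 + x) (0 + (0 + x)) (by omega)
        (by rw [hxl]; omega)]
    rw [alt_fold]
    rw [hxl]
    have h5 : (r.length : Int) + 1 - 1 = (r.length : Int) := by ring
    rw [h5]
    ring

-- ===== VERDICT (by name: the statement is the Claim_ definition above) =====
theorem barista_spec : Claim_equal_barista := by
  unfold Claim_equal_barista
  intro coffees _
  unfold Spec_barista
  exact barista_eq coffees
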